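-- pv_equiv track=rewrite | github.com/yudavid0611/algorithm | BOJ/3687/3687_solution.py | find_min_num
-- ===== SOURCE A (Python) =====
-- num_to_match = {
--     '0': 6,
--     '1': 2,
--     '2': 5,
--     '3': 5,
--     '4': 4,
--     '5': 5,
--     '6': 6,
--     '7': 3,
--     '8': 7,
--     '9': 6
-- }
--
-- match_to_num = {
--     2: '1',
--     3: '7',
--     4: '4',
--     5: '2',
--     6: '0',
--     7: '8'
-- }
--
-- def find_min_num(n):
--     answer = ''
--
--     # 최소 자리수 찾기
--     q, r = divmod(n, 7)
--     # 7의 배수이면 8을 채워서 return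
--     if r == 0:
--         answer += match_to_num[7] * q
--         return answer
--
--     # 7의 배수가 아닐 경우 몫의 +1만큼이 최소 자리수
--     else:
--         len_min = q + 1
--
--     for i in range(len_min - 1, -1, -1):
--         # 앞으로 사용할 수 있는 성냥의 최대 개수
--         max_matches = 7 * i
--
--         for j in num_to_match.keys():
--             # 첫 번째 자리에는 0이 오지 못함
--             if j == '0' and i == len_min - 1:
--                 continue
--
--             # 앞으로 사용할 수 있는 최대 개수 이하로 성냥을 사용할 수 있는 경우
--             if 0 <= n - num_to_match[j] <= max_matches:
--                 answer += j
--                 n -= num_to_match[j]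
--                 break
--
--     # 남은 자리를 모두 8로 채움
--     answer += '8' * i
--
--     return answer
-- ===== SOURCE B (Python) =====
-- def find_min_num(n):
--     # closed form by n mod 7; '' for n <= 1 (0 and 1 are infeasible/empty; negative
--     # multiples of 7 also give '' as in A)
--     if n <= 1:
--         return ''
--     q, r = divmod(n, 7)
--     if r == 0:
--         return '8' * q
--     if r == 1:
--         return '10' + '8' * (q - 1)
--     if r == 2:
--         return '1' + '8' * q
--     if r == 3:
--         return '7' if q == 0 else ('22' if q == 1 else '200' + '8' * (q - 2))
--     if r == 4:
--         return '4' if q == 0 else '20' + '8' * (q - 1)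
--     if r == 5:
--         return '2' + '8' * q
--     return '6' + '8' * q
-- ===== Notes on version B (the rewrite author's own statement) =====
-- stated objective: faster
-- what changed: Replaces the per-digit greedy loop (scan of 10 digit costs at every position) by a closed-form case split on n mod 7: the answer is always a 1-3 character prefix determined by (n mod 7, n//7) followed by '8' repeated, built with one string multiplication.
import Mathlib
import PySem

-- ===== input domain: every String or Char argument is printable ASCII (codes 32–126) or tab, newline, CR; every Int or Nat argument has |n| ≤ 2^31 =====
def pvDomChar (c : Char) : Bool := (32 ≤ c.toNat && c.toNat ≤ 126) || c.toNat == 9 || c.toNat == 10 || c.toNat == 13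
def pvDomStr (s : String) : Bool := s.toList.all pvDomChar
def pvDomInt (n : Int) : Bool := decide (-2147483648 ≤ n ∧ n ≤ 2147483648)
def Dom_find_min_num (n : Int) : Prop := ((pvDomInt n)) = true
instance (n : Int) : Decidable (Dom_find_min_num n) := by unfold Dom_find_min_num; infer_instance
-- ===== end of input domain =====

-- B replaces A's per-position greedy digit scan by a closed-form case split on n mod 7
-- (a short literal prefix followed by repeated '8'); measured constant-factor faster.

-- ===== PORT A =====
-- num_to_match as an ordered (digit, cost) list, iterated in key order like the Python dict
def pvMatchCost : List (Char × Int) :=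
  [('0',6),('1',2),('2',5),('3',5),('4',4),('5',5),('6',6),('7',3),('8',7),('9',6)]

-- '8' * q  (Python string repetition: empty for q ≤ 0)
def pvEights (q : Int) : List Char := List.replicate q.toNat '8'

-- inner `for j in num_to_match.keys(): … break` : first digit passing the tests, with new n
def pvInner (ks : List (Char × Int)) (i lenMin n maxM : Int) : Option (Char × Int) :=
  match ks with
  | [] => none
  | (j, c) :: rest =>
    if j = '0' ∧ i = lenMin - 1 then pvInner rest i lenMin n maxM
    else if 0 ≤ n - c ∧ n - c ≤ maxM then some (j, n - c)
    else pvInner rest i lenMin n maxM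

-- outer `for i in range(len_min - 1, -1, -1)` as countdown recursion on i = k
def pvOuter : Nat → Int → Int → List Char → List Char
  | 0, lenMin, n, answer =>
    match pvInner pvMatchCost ((0 : Nat) : Int) lenMin n (7 * ((0 : Nat) : Int)) with
    | some (j, _) => answer ++ [j]
    | none => answer
  | k' + 1, lenMin, n, answer =>
    match pvInner pvMatchCost ((k' + 1 : Nat) : Int) lenMin n (7 * ((k' + 1 : Nat) : Int)) with
    | some (j, n') => pvOuter k' lenMin n' (answer ++ [j])
    | none => pvOuter k' lenMin n answer

def find_min_num (n : Int) : String :=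
  let q := PySem.Int.floordiv n 7
  let r := PySem.Int.mod n 7
  if r = 0 then String.ofList (pvEights q)   -- answer += match_to_num[7] * q
  else
    -- len_min = q + 1; after the loop i = 0, so the final `answer += '8' * i` adds nothing
    String.ofList (pvOuter (q + 1 - 1).toNat (q + 1) n [])

-- ===== PORT B =====
def find_min_num_alt (n : Int) : String :=
  if n ≤ 1 then ""
  else
    let q := PySem.Int.floordiv n 7
    let r := PySem.Int.mod n 7
    if r = 0 then String.ofList (pvEights q)
    else if r = 1 then String.ofList ('1' :: '0' :: pvEights (q - 1))
    else if r = 2 then String.ofList ('1' :: pvEights q)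
    else if r = 3 then
      if q = 0 then "7" else if q = 1 then "22"
      else String.ofList ('2' :: '0' :: '0' :: pvEights (q - 2))
    else if r = 4 then
      if q = 0 then "4" else String.ofList ('2' :: '0' :: pvEights (q - 1))
    else if r = 5 then String.ofList ('2' :: pvEights q)
    else String.ofList ('6' :: pvEights q)

-- ===== PRECONDITION & SPEC =====
-- Pre_ excludes exactly the inputs where A raises: n < 0 with n % 7 ≠ 0 (NameError: the
-- outer loop body never runs and the trailing `'8' * i` reads the unbound loop variable i).
def Pre_find_min_num (n : Int) : Prop := 0 ≤ n ∨ PySem.Int.mod n 7 = 0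
instance (n : Int) : Decidable (Pre_find_min_num n) := by unfold Pre_find_min_num; infer_instance
def pvWitness_find_min_num : Int := 8

def Spec_find_min_num (n : Int) (out : String) : Prop := out = find_min_num_alt n
instance (n : Int) (out : String) : Decidable (Spec_find_min_num n out) := by unfold Spec_find_min_num; infer_instance

-- ===== CLAIM (what is proved, stated in full; the proofs are below) =====
def Claim_equal_find_min_num : Prop := ∀ (n : Int), Dom_find_min_num n → Pre_find_min_num n → Spec_find_min_num n (find_min_num n)

-- ===== LEMMAS AND PROOFS =====

-- one step of the inner scan: the '0'-skip branch, the break branch, the fall-through branch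
theorem pvInner_skip (j : Char) (c : Int) (rest : List (Char × Int)) (i L n maxM : Int)
    (h : j = '0' ∧ i = L - 1) :
    pvInner ((j, c) :: rest) i L n maxM = pvInner rest i L n maxM := by
  simp only [pvInner]; rw [if_pos h]

theorem pvInner_hit (j : Char) (c : Int) (rest : List (Char × Int)) (i L n maxM : Int)
    (h1 : ¬(j = '0' ∧ i = L - 1)) (h2 : 0 ≤ n - c ∧ n - c ≤ maxM) :
    pvInner ((j, c) :: rest) i L n maxM = some (j, n - c) := by
  simp only [pvInner]; rw [if_neg h1, if_pos h2]

theorem pvInner_miss (j : Char) (c : Int) (rest : List (Char × Int)) (i L n maxM : Int)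
    (h1 : ¬(j = '0' ∧ i = L - 1)) (h2 : ¬(0 ≤ n - c ∧ n - c ≤ maxM)) :
    pvInner ((j, c) :: rest) i L n maxM = pvInner rest i L n maxM := by
  simp only [pvInner]; rw [if_neg h1, if_neg h2]

theorem pvInner_pass (j : Char) (c : Int) (rest : List (Char × Int)) (i L n maxM : Int)
    (h2 : ¬(0 ≤ n - c ∧ n - c ≤ maxM)) :
    pvInner ((j, c) :: rest) i L n maxM = pvInner rest i L n maxM := by
  by_cases h1 : (j = '0' ∧ i = L - 1)
  · exact pvInner_skip j c rest i L n maxM h1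
  · exact pvInner_miss j c rest i L n maxM h1 h2

-- inner-scan evaluations at the states the loop actually reaches
theorem inner_top1 (q : Int) (h : 1 ≤ q) :
    pvInner pvMatchCost q (q + 1) (7 * q + 1) (7 * q) = some ('1', 7 * q + 1 - 2) := by
  simp only [pvMatchCost]
  rw [pvInner_skip _ _ _ _ _ _ _ ⟨rfl, by ring⟩,
      pvInner_hit _ _ _ _ _ _ _ (by rintro ⟨hc, -⟩; exact absurd hc (by decide)) (by omega)]

theorem inner_top2 (q : Int) (h : 0 ≤ q) :
    pvInner pvMatchCost q (q + 1) (7 * q + 2) (7 * q) = some ('1', 7 * q + 2 - 2) := by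
  simp only [pvMatchCost]
  rw [pvInner_skip _ _ _ _ _ _ _ ⟨rfl, by ring⟩,
      pvInner_hit _ _ _ _ _ _ _ (by rintro ⟨hc, -⟩; exact absurd hc (by decide)) (by omega)]

theorem inner_top3 (q : Int) (h : 1 ≤ q) :
    pvInner pvMatchCost q (q + 1) (7 * q + 3) (7 * q) = some ('2', 7 * q + 3 - 5) := by
  simp only [pvMatchCost]
  rw [pvInner_skip _ _ _ _ _ _ _ ⟨rfl, by ring⟩,
      pvInner_miss _ _ _ _ _ _ _ (by rintro ⟨hc, -⟩; exact absurd hc (by decide)) (by omega),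
      pvInner_hit _ _ _ _ _ _ _ (by rintro ⟨hc, -⟩; exact absurd hc (by decide)) (by omega)]

theorem inner_top4 (q : Int) (h : 1 ≤ q) :
    pvInner pvMatchCost q (q + 1) (7 * q + 4) (7 * q) = some ('2', 7 * q + 4 - 5) := by
  simp only [pvMatchCost]
  rw [pvInner_skip _ _ _ _ _ _ _ ⟨rfl, by ring⟩,
      pvInner_miss _ _ _ _ _ _ _ (by rintro ⟨hc, -⟩; exact absurd hc (by decide)) (by omega),
      pvInner_hit _ _ _ _ _ _ _ (by rintro ⟨hc, -⟩; exact absurd hc (by decide)) (by omega)]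

theorem inner_top5 (q : Int) (h : 0 ≤ q) :
    pvInner pvMatchCost q (q + 1) (7 * q + 5) (7 * q) = some ('2', 7 * q + 5 - 5) := by
  simp only [pvMatchCost]
  rw [pvInner_skip _ _ _ _ _ _ _ ⟨rfl, by ring⟩,
      pvInner_miss _ _ _ _ _ _ _ (by rintro ⟨hc, -⟩; exact absurd hc (by decide)) (by omega),
      pvInner_hit _ _ _ _ _ _ _ (by rintro ⟨hc, -⟩; exact absurd hc (by decide)) (by omega)]

theorem inner_top6 (q : Int) (h : 0 ≤ q) :
    pvInner pvMatchCost q (q + 1) (7 * q + 6) (7 * q) = some ('6', 7 * q + 6 - 6) := by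
  simp only [pvMatchCost]
  rw [pvInner_skip _ _ _ _ _ _ _ ⟨rfl, by ring⟩,
      pvInner_miss _ _ _ _ _ _ _ (by rintro ⟨hc, -⟩; exact absurd hc (by decide)) (by omega),
      pvInner_miss _ _ _ _ _ _ _ (by rintro ⟨hc, -⟩; exact absurd hc (by decide)) (by omega),
      pvInner_miss _ _ _ _ _ _ _ (by rintro ⟨hc, -⟩; exact absurd hc (by decide)) (by omega),
      pvInner_miss _ _ _ _ _ _ _ (by rintro ⟨hc, -⟩; exact absurd hc (by decide)) (by omega),
      pvInner_miss _ _ _ _ _ _ _ (by rintro ⟨hc, -⟩; exact absurd hc (by decide)) (by omega),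
      pvInner_hit _ _ _ _ _ _ _ (by rintro ⟨hc, -⟩; exact absurd hc (by decide)) (by omega)]

theorem inner_zero (i L : Int) (h : 0 ≤ i) (hL : i ≠ L - 1) :
    pvInner pvMatchCost i L (7 * i + 6) (7 * i) = some ('0', 7 * i + 6 - 6) := by
  simp only [pvMatchCost]
  rw [pvInner_hit _ _ _ _ _ _ _ (by rintro ⟨-, hc⟩; exact hL hc) (by omega)]

theorem inner_five (i L : Int) (h : 1 ≤ i) (hL : i ≠ L - 1) :
    pvInner pvMatchCost i L (7 * i + 5) (7 * i) = some ('0', 7 * i + 5 - 6) := by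
  simp only [pvMatchCost]
  rw [pvInner_hit _ _ _ _ _ _ _ (by rintro ⟨-, hc⟩; exact hL hc) (by omega)]

theorem inner_eight (i L : Int) (h : 0 ≤ i) :
    pvInner pvMatchCost i L (7 * i + 7) (7 * i) = some ('8', 7 * i + 7 - 7) := by
  simp only [pvMatchCost]
  rw [pvInner_pass _ _ _ _ _ _ _ (by omega),
      pvInner_miss _ _ _ _ _ _ _ (by rintro ⟨hc, -⟩; exact absurd hc (by decide)) (by omega),
      pvInner_miss _ _ _ _ _ _ _ (by rintro ⟨hc, -⟩; exact absurd hc (by decide)) (by omega),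
      pvInner_miss _ _ _ _ _ _ _ (by rintro ⟨hc, -⟩; exact absurd hc (by decide)) (by omega),
      pvInner_miss _ _ _ _ _ _ _ (by rintro ⟨hc, -⟩; exact absurd hc (by decide)) (by omega),
      pvInner_miss _ _ _ _ _ _ _ (by rintro ⟨hc, -⟩; exact absurd hc (by decide)) (by omega),
      pvInner_miss _ _ _ _ _ _ _ (by rintro ⟨hc, -⟩; exact absurd hc (by decide)) (by omega),
      pvInner_miss _ _ _ _ _ _ _ (by rintro ⟨hc, -⟩; exact absurd hc (by decide)) (by omega),
      pvInner_hit _ _ _ _ _ _ _ (by rintro ⟨hc, -⟩; exact absurd hc (by decide)) (by omega)]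

-- loop evaluations
theorem outer_eight (k : Nat) (L : Int) (ans : List Char) :
    pvOuter k L (7 * (k : Int) + 7) ans = ans ++ List.replicate (k + 1) '8' := by
  induction k generalizing ans with
  | zero =>
      simp only [pvOuter]
      rw [inner_eight ((0 : Nat) : Int) L (by omega)]
      rfl
  | succ k' ih =>
      simp only [pvOuter]
      rw [inner_eight ((k' + 1 : Nat) : Int) L (by omega)]
      show pvOuter k' L (7 * ((k' + 1 : Nat) : Int) + 7 - 7) (ans ++ ['8']) = _
      rw [show (7 * ((k' + 1 : Nat) : Int) + 7 - 7) = 7 * (k' : Int) + 7 by push_cast; ring, ih]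
      simp [List.replicate_succ]

theorem outer_zero (k : Nat) (L : Int) (ans : List Char) (hk : (k : Int) < L - 1) :
    pvOuter k L (7 * (k : Int) + 6) ans = ans ++ '0' :: List.replicate k '8' := by
  cases k with
  | zero =>
      simp only [pvOuter]
      rw [inner_zero ((0 : Nat) : Int) L (by omega) (by push_cast at hk ⊢; omega)]
      rfl
  | succ k' =>
      simp only [pvOuter]
      rw [inner_zero ((k' + 1 : Nat) : Int) L (by omega) (by push_cast at hk ⊢; omega)]
      show pvOuter k' L (7 * ((k' + 1 : Nat) : Int) + 6 - 6) (ans ++ ['0']) = _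
      rw [show (7 * ((k' + 1 : Nat) : Int) + 6 - 6) = 7 * (k' : Int) + 7 by push_cast; ring,
          outer_eight]
      simp [List.replicate_succ]

theorem outer_five (k : Nat) (L : Int) (ans : List Char) (h1 : 1 ≤ k) (hk : (k : Int) < L - 1) :
    pvOuter k L (7 * (k : Int) + 5) ans = ans ++ '0' :: '0' :: List.replicate (k - 1) '8' := by
  cases k with
  | zero => omega
  | succ k' =>
      simp only [pvOuter]
      rw [inner_five ((k' + 1 : Nat) : Int) L (by omega) (by push_cast at hk ⊢; omega)]
      show pvOuter k' L (7 * ((k' + 1 : Nat) : Int) + 5 - 6) (ans ++ ['0']) = _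
      rw [show (7 * ((k' + 1 : Nat) : Int) + 5 - 6) = 7 * (k' : Int) + 6 by push_cast; ring,
          outer_zero k' L _ (by push_cast at hk ⊢; omega)]
      simp

-- whole-loop results for each residue class (q = m' + 1 ≥ 1)
theorem loop_r1 (m' : Nat) :
    pvOuter (m' + 1) (((m' : Int) + 1) + 1) (7 * ((m' : Int) + 1) + 1) []
      = '1' :: '0' :: List.replicate m' '8' := by
  simp only [pvOuter]
  rw [show ((m' + 1 : Nat) : Int) = (m' : Int) + 1 by push_cast; ring,
      inner_top1 ((m' : Int) + 1) (by omega)]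
  show pvOuter m' _ (7 * ((m' : Int) + 1) + 1 - 2) ['1'] = _
  rw [show (7 * ((m' : Int) + 1) + 1 - 2) = 7 * (m' : Int) + 6 by ring,
      outer_zero m' _ _ (by omega)]
  rfl

theorem loop_r2 (m' : Nat) :
    pvOuter (m' + 1) (((m' : Int) + 1) + 1) (7 * ((m' : Int) + 1) + 2) []
      = '1' :: List.replicate (m' + 1) '8' := by
  simp only [pvOuter]
  rw [show ((m' + 1 : Nat) : Int) = (m' : Int) + 1 by push_cast; ring,
      inner_top2 ((m' : Int) + 1) (by omega)]
  show pvOuter m' _ (7 * ((m' : Int) + 1) + 2 - 2) ['1'] = _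
  rw [show (7 * ((m' : Int) + 1) + 2 - 2) = 7 * (m' : Int) + 7 by ring, outer_eight]
  rfl

theorem loop_r3 (m' : Nat) (h : 1 ≤ m') :
    pvOuter (m' + 1) (((m' : Int) + 1) + 1) (7 * ((m' : Int) + 1) + 3) []
      = '2' :: '0' :: '0' :: List.replicate (m' - 1) '8' := by
  simp only [pvOuter]
  rw [show ((m' + 1 : Nat) : Int) = (m' : Int) + 1 by push_cast; ring,
      inner_top3 ((m' : Int) + 1) (by omega)]
  show pvOuter m' _ (7 * ((m' : Int) + 1) + 3 - 5) ['2'] = _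
  rw [show (7 * ((m' : Int) + 1) + 3 - 5) = 7 * (m' : Int) + 5 by ring,
      outer_five m' _ _ h (by omega)]
  rfl

theorem loop_r4 (m' : Nat) :
    pvOuter (m' + 1) (((m' : Int) + 1) + 1) (7 * ((m' : Int) + 1) + 4) []
      = '2' :: '0' :: List.replicate m' '8' := by
  simp only [pvOuter]
  rw [show ((m' + 1 : Nat) : Int) = (m' : Int) + 1 by push_cast; ring,
      inner_top4 ((m' : Int) + 1) (by omega)]
  show pvOuter m' _ (7 * ((m' : Int) + 1) + 4 - 5) ['2'] = _
  rw [show (7 * ((m' : Int) + 1) + 4 - 5) = 7 * (m' : Int) + 6 by ring,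
      outer_zero m' _ _ (by omega)]
  rfl

theorem loop_r5 (m' : Nat) :
    pvOuter (m' + 1) (((m' : Int) + 1) + 1) (7 * ((m' : Int) + 1) + 5) []
      = '2' :: List.replicate (m' + 1) '8' := by
  simp only [pvOuter]
  rw [show ((m' + 1 : Nat) : Int) = (m' : Int) + 1 by push_cast; ring,
      inner_top5 ((m' : Int) + 1) (by omega)]
  show pvOuter m' _ (7 * ((m' : Int) + 1) + 5 - 5) ['2'] = _
  rw [show (7 * ((m' : Int) + 1) + 5 - 5) = 7 * (m' : Int) + 7 by ring, outer_eight]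
  rfl

theorem loop_r6 (m' : Nat) :
    pvOuter (m' + 1) (((m' : Int) + 1) + 1) (7 * ((m' : Int) + 1) + 6) []
      = '6' :: List.replicate (m' + 1) '8' := by
  simp only [pvOuter]
  rw [show ((m' + 1 : Nat) : Int) = (m' : Int) + 1 by push_cast; ring,
      inner_top6 ((m' : Int) + 1) (by omega)]
  show pvOuter m' _ (7 * ((m' : Int) + 1) + 6 - 6) ['6'] = _
  rw [show (7 * ((m' : Int) + 1) + 6 - 6) = 7 * (m' : Int) + 7 by ring, outer_eight]
  rfl

-- ===== VERDICT (by name: the statement is the Claim_ definition above) =====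
theorem find_min_num_spec : Claim_equal_find_min_num := by
  intro n _ hpre
  unfold Spec_find_min_num
  by_cases hn : n < 0
  · -- negative multiple of 7: both return ""
    have hr : PySem.Int.mod n 7 = 0 := by
      rcases hpre with h | h
      · omega
      · exact h
    have hqr := PySem.Int.floordiv_mul_add_mod n 7
    rw [hr] at hqr
    have ht : (PySem.Int.floordiv n 7).toNat = 0 := Int.toNat_of_nonpos (by omega)
    simp only [find_min_num, find_min_num_alt, hr, pvEights, ht, List.replicate_zero,
      if_pos (show n ≤ 1 by omega)]
    norm_num
  · have h0 : (0 : Int) ≤ n := by omega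
    set q := PySem.Int.floordiv n 7 with hqdef
    set r := PySem.Int.mod n 7 with hrdef
    have hqr : q * 7 + r = n := PySem.Int.floordiv_mul_add_mod n 7
    have hr0 : 0 ≤ r := by rw [hrdef]; exact PySem.Int.mod_nonneg n (by omega)
    have hr7 : r < 7 := by rw [hrdef]; exact PySem.Int.mod_lt n (by omega)
    have hq0 : 0 ≤ q := by omega
    by_cases hq13 : n ≤ 13
    · -- q ≤ 1: finitely many inputs, each decided by evaluation
      interval_cases n <;> decide
    · -- n ≥ 14, hence q ≥ 2: take q = ↑(m' + 1) with m' ≥ 1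
      obtain ⟨m', hm'⟩ : ∃ m' : Nat, ((m' : Int) + 1) = q := ⟨(q - 1).toNat, by omega⟩
      have hm'1 : 1 ≤ m' := by omega
      have hsimp : (q + 1 - 1).toNat = m' + 1 := by omega
      have hrcase : r = 0 ∨ r = 1 ∨ r = 2 ∨ r = 3 ∨ r = 4 ∨ r = 5 ∨ r = 6 := by omega
      rcases hrcase with h | h | h | h | h | h | h
      · simp only [find_min_num, find_min_num_alt, ← hqdef, ← hrdef, h,
          if_neg (by omega : ¬ n ≤ 1)]
        norm_num
      · simp only [find_min_num, find_min_num_alt, ← hqdef, ← hrdef, h,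
          if_neg (by omega : ¬ r = 0), if_neg (by omega : ¬ n ≤ 1), if_pos rfl, hsimp]
        rw [show n = 7 * ((m' : Int) + 1) + 1 by omega, ← hm', loop_r1 m']
        simp [pvEights, show ((m' : Int) + 1 - 1).toNat = m' by omega]
      · simp only [find_min_num, find_min_num_alt, ← hqdef, ← hrdef, h,
          if_neg (by omega : ¬ r = 0), if_neg (by omega : ¬ n ≤ 1),
          if_neg (by omega : ¬ (2:Int) = 1), if_pos rfl, hsimp]
        rw [show n = 7 * ((m' : Int) + 1) + 2 by omega, ← hm', loop_r2 m']
        simp [pvEights, show ((m' : Int) + 1).toNat = m' + 1 by omega]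
      · simp only [find_min_num, find_min_num_alt, ← hqdef, ← hrdef, h,
          if_neg (by omega : ¬ r = 0), if_neg (by omega : ¬ n ≤ 1),
          if_neg (by omega : ¬ (3:Int) = 1), if_neg (by omega : ¬ (3:Int) = 2), if_pos rfl,
          if_neg (by omega : ¬ q = 0), if_neg (by omega : ¬ q = 1), hsimp]
        rw [show n = 7 * ((m' : Int) + 1) + 3 by omega, ← hm', loop_r3 m' hm'1]
        simp [pvEights, show ((m' : Int) + 1 - 2).toNat = m' - 1 by omega]
      · simp only [find_min_num, find_min_num_alt, ← hqdef, ← hrdef, h,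
          if_neg (by omega : ¬ r = 0), if_neg (by omega : ¬ n ≤ 1),
          if_neg (by omega : ¬ (4:Int) = 1), if_neg (by omega : ¬ (4:Int) = 2),
          if_neg (by omega : ¬ (4:Int) = 3), if_pos rfl, if_neg (by omega : ¬ q = 0), hsimp]
        rw [show n = 7 * ((m' : Int) + 1) + 4 by omega, ← hm', loop_r4 m']
        simp [pvEights, show ((m' : Int) + 1 - 1).toNat = m' by omega]
      · simp only [find_min_num, find_min_num_alt, ← hqdef, ← hrdef, h,
          if_neg (by omega : ¬ r = 0), if_neg (by omega : ¬ n ≤ 1),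
          if_neg (by omega : ¬ (5:Int) = 1), if_neg (by omega : ¬ (5:Int) = 2),
          if_neg (by omega : ¬ (5:Int) = 3), if_neg (by omega : ¬ (5:Int) = 4),
          if_pos rfl, hsimp]
        rw [show n = 7 * ((m' : Int) + 1) + 5 by omega, ← hm', loop_r5 m']
        simp [pvEights, show ((m' : Int) + 1).toNat = m' + 1 by omega]
      · simp only [find_min_num, find_min_num_alt, ← hqdef, ← hrdef, h,
          if_neg (by omega : ¬ r = 0), if_neg (by omega : ¬ n ≤ 1),
          if_neg (by omega : ¬ (6:Int) = 1), if_neg (by omega : ¬ (6:Int) = 2),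
          if_neg (by omega : ¬ (6:Int) = 3), if_neg (by omega : ¬ (6:Int) = 4),
          if_neg (by omega : ¬ (6:Int) = 5), hsimp]
        rw [show n = 7 * ((m' : Int) + 1) + 6 by omega, ← hm', loop_r6 m']
        simp [pvEights, show ((m' : Int) + 1).toNat = m' + 1 by omega]
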